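-- pv_equiv track=rewrite | github.com/JerryJohnThomas/deceptionNet | deceptionNet/human_play.py | _extract_vote_target
-- ===== SOURCE A (Python) =====
-- from typing import Any, Callable, Dict, List, Optional
--
-- def _extract_vote_target(action_text: str) -> Optional[int]:
--     digits = ''.join(ch for ch in action_text if ch.isdigit())
--     if not digits:
--         return None
--     try:
--         return int(digits[-1])
--     except ValueError:
--         return None
-- ===== SOURCE B (Python) =====
-- def _extract_vote_target(action_text):
--     # Reverse short-circuiting scan: no digit-string accumulator is built.
--     for ch in reversed(action_text):
--         if ch.isdigit():
--             return int(ch)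
--     return None
-- ===== Notes on version B (the rewrite author's own statement) =====
-- stated objective: idiomatic
-- what changed: Instead of building the full filtered digit string and taking its last character, B scans the characters in reverse and returns int(ch) at the first digit found, short-circuiting with no accumulator.
import Mathlib
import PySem

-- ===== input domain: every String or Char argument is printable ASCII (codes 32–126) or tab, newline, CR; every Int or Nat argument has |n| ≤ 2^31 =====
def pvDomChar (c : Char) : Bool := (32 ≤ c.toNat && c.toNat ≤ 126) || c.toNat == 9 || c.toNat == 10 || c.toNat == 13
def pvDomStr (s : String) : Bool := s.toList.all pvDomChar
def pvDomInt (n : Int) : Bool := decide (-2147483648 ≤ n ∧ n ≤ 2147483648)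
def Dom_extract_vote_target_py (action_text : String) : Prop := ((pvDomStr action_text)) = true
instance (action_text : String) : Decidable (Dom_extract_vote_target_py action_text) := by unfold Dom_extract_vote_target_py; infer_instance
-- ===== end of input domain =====

-- B replaces A's filter-then-take-last pass by a reverse short-circuiting scan (idiomatic, no accumulator).

-- ===== PORT A =====
def extract_vote_target_py (action_text : String) : Option Int :=
  -- digits = ''.join(ch for ch in action_text if ch.isdigit())
  let digits := action_text.toList.filter PySem.Chars.isdigit
  -- if not digits: return None
  if digits = [] then none
  else
    -- try: return int(digits[-1]) except ValueError: return None
    match PySem.List.pyGet? digits (-1) with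
    | some c => PySem.Int.ofChars? [c]   -- int() ValueError maps to none, matching the except branch
    | none => none

-- ===== PORT B =====
-- the reversed(action_text) loop: first digit from the right wins, else None
def pvRevScan : List Char → Option Int
  | [] => none
  | c :: rest => if PySem.Chars.isdigit c then PySem.Int.ofChars? [c] else pvRevScan rest

def extract_vote_target_py_alt (action_text : String) : Option Int :=
  pvRevScan action_text.toList.reverse

-- ===== PRECONDITION & SPEC =====
def Spec_extract_vote_target_py (action_text : String) (out : Option Int) : Prop := out = extract_vote_target_py_alt action_text
instance (action_text : String) (out : Option Int) : Decidable (Spec_extract_vote_target_py action_text out) := by unfold Spec_extract_vote_target_py; infer_instance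

-- ===== CLAIM (what is proved, stated in full; the proofs are below) =====
def Claim_equal_extract_vote_target_py : Prop := ∀ (action_text : String), Dom_extract_vote_target_py action_text → Spec_extract_vote_target_py action_text (extract_vote_target_py action_text)

-- ===== LEMMAS AND PROOFS =====

-- pvRevScan applies int() to the head of the digit-filtered list
theorem pvRevScan_eq_head (l : List Char) :
    pvRevScan l = (l.filter PySem.Chars.isdigit).head?.bind (fun c => PySem.Int.ofChars? [c]) := by
  induction l with
  | nil => simp [pvRevScan]
  | cons c rest ih =>
    by_cases h : PySem.Chars.isdigit c = true
    · simp [pvRevScan, h, List.filter_cons]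
    · simp [pvRevScan, h, List.filter_cons, ih]

-- ===== VERDICT (by name: the statement is the Claim_ definition above) =====
theorem extract_vote_target_py_spec : Claim_equal_extract_vote_target_py := by
  intro s _
  unfold Spec_extract_vote_target_py extract_vote_target_py extract_vote_target_py_alt
  rw [pvRevScan_eq_head, List.filter_reverse]
  simp only [PySem.List.pyGet?_neg_one, List.head?_reverse]
  cases hfe : (s.toList.filter PySem.Chars.isdigit).getLast? with
  | none =>
    have : s.toList.filter PySem.Chars.isdigit = [] := by
      cases hx : s.toList.filter PySem.Chars.isdigit with
      | nil => rfl
      | cons a b => rw [hx] at hfe; simp [List.getLast?_cons] at hfe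
    simp [this]
  | some c =>
    have hne : s.toList.filter PySem.Chars.isdigit ≠ [] := by
      intro hx; rw [hx] at hfe; simp at hfe
    simp [hne, hfe]
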